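-- pv_equiv track=rewrite | github.com/Rathisri050406/Data-Structure-intern-exercise | LCM 2ptr.py | find_largest_common_element
-- ===== SOURCE A (Python) =====
-- def find_largest_common_element(arr1, arr2):
--     # Sort both arrays in ascending order
--     arr1.sort()
--     arr2.sort()
--
--     # Start from the end to find largest common element
--     pointer1 = len(arr1) - 1
--     pointer2 = len(arr2) - 1
--
--     while pointer1 >= 0 and pointer2 >= 0:
--         if arr1[pointer1] == arr2[pointer2]:
--             return arr1[pointer1]
--         elif arr1[pointer1] > arr2[pointer2]:
--             pointer1 -= 1
--         else:
--             pointer2 -= 1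
--     return None
-- ===== SOURCE B (Python) =====
-- def find_largest_common_element(arr1, arr2):
--     # Same observable mutation as the original: both arrays sorted ascending in place.
--     arr1.sort()
--     arr2.sort()
--
--     def contains(a, x):
--         # hand-written bisect_left membership test on the sorted array a
--         lo, hi = 0, len(a)
--         while lo < hi:
--             mid = (lo + hi) // 2
--             if a[mid] < x:
--                 lo = mid + 1
--             else:
--                 hi = mid
--         return lo < len(a) and a[lo] == x
--
--     # scan arr1 largest-first; first value present in arr2 is the answer
--     for x in reversed(arr1):
--         if contains(arr2, x):
--             return x
--     return None
-- ===== Notes on version B (the rewrite author's own statement) =====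
-- stated objective: alternative
-- what changed: Replaces the simultaneous two-pointer backwards merge of the two sorted arrays by a largest-first scan of sorted arr1 with a hand-written binary-search membership test over sorted arr2 (both in-place sorts kept).
import Mathlib
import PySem

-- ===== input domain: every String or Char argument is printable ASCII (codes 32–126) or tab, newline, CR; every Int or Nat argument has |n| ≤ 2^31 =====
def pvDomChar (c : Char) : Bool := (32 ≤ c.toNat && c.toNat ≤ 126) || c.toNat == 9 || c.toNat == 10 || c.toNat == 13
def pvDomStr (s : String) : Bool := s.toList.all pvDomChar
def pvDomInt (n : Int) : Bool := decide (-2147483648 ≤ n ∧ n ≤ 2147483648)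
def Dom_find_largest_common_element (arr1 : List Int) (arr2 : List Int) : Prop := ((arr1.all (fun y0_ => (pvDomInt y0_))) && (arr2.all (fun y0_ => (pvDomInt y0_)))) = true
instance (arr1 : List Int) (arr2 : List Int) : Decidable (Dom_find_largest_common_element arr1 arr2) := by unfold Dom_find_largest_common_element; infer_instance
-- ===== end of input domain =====

-- B replaces A's two-pointer backwards merge by a largest-first scan of sorted arr1
-- with a binary-search membership test over sorted arr2 (alternative decomposition;
-- both versions sort the argument lists in place — the equivalence proved here is
-- about the RETURN value, and the in-place sorts are identical on both sides anyway).

-- ===== PORT A =====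
-- the while loop of A: two indices walking down the sorted lists
-- (fuel is only a totality device: at entry it equals the loop measure and never runs out)
def pvLoopA (s1 s2 : List Int) (fuel : Nat) (i j : Int) : Option Int :=
  match fuel with
  | 0 => none
  | fuel + 1 =>
    if 0 ≤ i ∧ 0 ≤ j then
      match PySem.List.pyGet? s1 i, PySem.List.pyGet? s2 j with
      | some a, some b =>
        if a = b then some a
        else if a > b then pvLoopA s1 s2 fuel (i - 1) j
        else pvLoopA s1 s2 fuel i (j - 1)
      | _, _ => none   -- IndexError; unreachable from the entry point (indices stay below the lengths)
    else none

def find_largest_common_element (arr1 : List Int) (arr2 : List Int) : Option Int :=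
  let s1 := PySem.List.sorted arr1 (fun x => x)
  let s2 := PySem.List.sorted arr2 (fun x => x)
  pvLoopA s1 s2 (s1.length + s2.length) ((s1.length : Int) - 1) ((s2.length : Int) - 1)

-- ===== PORT B =====
-- Source B's hand-written bisect_left loop (fuel = totality device, at entry ≥ hi - lo)
def pvBisect (a : List Int) (x : Int) (fuel lo hi : Nat) : Nat :=
  match fuel with
  | 0 => lo
  | fuel + 1 =>
    if lo < hi then
      let mid := (lo + hi) / 2
      if a.getD mid 0 < x then pvBisect a x fuel (mid + 1) hi else pvBisect a x fuel lo mid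
    else lo

-- Source B's `contains`: binary-search membership in the sorted list a
def pvContains (a : List Int) (x : Int) : Bool :=
  let lo := pvBisect a x a.length 0 a.length
  decide (lo < a.length) && (a.getD lo 0 == x)

def find_largest_common_element_alt (arr1 : List Int) (arr2 : List Int) : Option Int :=
  let s1 := PySem.List.sorted arr1 (fun x => x)
  let s2 := PySem.List.sorted arr2 (fun x => x)
  s1.reverse.find? (fun x => pvContains s2 x)

-- ===== PRECONDITION & SPEC =====
def Spec_find_largest_common_element (arr1 : List Int) (arr2 : List Int) (out : Option Int) : Prop := out = find_largest_common_element_alt arr1 arr2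
instance (arr1 : List Int) (arr2 : List Int) (out : Option Int) : Decidable (Spec_find_largest_common_element arr1 arr2 out) := by unfold Spec_find_largest_common_element; infer_instance

-- ===== CLAIM (what is proved, stated in full; the proofs are below) =====
def Claim_equal_find_largest_common_element : Prop := ∀ (arr1 : List Int) (arr2 : List Int), Dom_find_largest_common_element arr1 arr2 → Spec_find_largest_common_element arr1 arr2 (find_largest_common_element arr1 arr2)

-- ===== LEMMAS AND PROOFS =====

theorem pv_find?_congr {α : Type} (p q : α → Bool) (l : List α)
    (h : ∀ x ∈ l, p x = q x) : l.find? p = l.find? q := by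
  induction l with
  | nil => rfl
  | cons a t ih =>
    simp only [List.find?]
    rw [h a (by simp)]
    cases q a with
    | true => rfl
    | false => exact ih (fun x hx => h x (by simp [hx]))

theorem pv_pairwise_le_getElem (s : List Int) (hs : s.Pairwise (· ≤ ·))
    (p q : Nat) (hq : q < s.length) (hpq : p ≤ q) : s[p]'(by omega) ≤ s[q] := by
  rcases Nat.lt_or_ge p q with h | h
  · exact (List.pairwise_iff_getElem.mp hs) p q (by omega) hq h
  · have : p = q := by omega
    subst this; rfl

theorem pvBisect_spec (a : List Int) (x : Int) (ha : a.Pairwise (· ≤ ·)) :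
    ∀ (fuel lo hi : Nat), hi ≤ a.length → lo ≤ hi → hi - lo ≤ fuel →
    (∀ k (hk : k < a.length), k < lo → a[k] < x) →
    (∀ k (hk : k < a.length), hi ≤ k → x ≤ a[k]) →
    pvBisect a x fuel lo hi ≤ a.length ∧
      (∀ k (hk : k < a.length), k < pvBisect a x fuel lo hi → a[k] < x) ∧
      (∀ k (hk : k < a.length), pvBisect a x fuel lo hi ≤ k → x ≤ a[k]) := by
  intro fuel
  induction fuel with
  | zero =>
    intro lo hi hhi hlohi hfuel hlow hhigh
    rw [pvBisect]
    exact ⟨by omega, fun k hk h => hlow k hk h, fun k hk h => hhigh k hk (by omega)⟩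
  | succ f ih =>
    intro lo hi hhi hlohi hfuel hlow hhigh
    by_cases hlt : lo < hi
    · rw [pvBisect, if_pos hlt]
      have hmid : (lo + hi) / 2 < a.length := by omega
      by_cases hcmp : a.getD ((lo + hi) / 2) 0 < x
      · rw [if_pos hcmp]
        refine ih ((lo + hi) / 2 + 1) hi hhi (by omega) (by omega) ?_ hhigh
        intro k hk hklt
        rcases Nat.lt_or_ge k lo with h | h
        · exact hlow k hk h
        · have h1 : a[k] ≤ a[(lo + hi) / 2] :=
            pv_pairwise_le_getElem a ha k ((lo + hi) / 2) hmid (by omega)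
          have h2 : a[(lo + hi) / 2] < x := by
            simpa [List.getD_eq_getElem?_getD, List.getElem?_eq_getElem hmid] using hcmp
          omega
      · rw [if_neg hcmp]
        refine ih lo ((lo + hi) / 2) (by omega) (by omega) (by omega) hlow ?_
        intro k hk hk2
        have h1 : a[(lo + hi) / 2] ≤ a[k] := pv_pairwise_le_getElem a ha ((lo + hi) / 2) k hk hk2
        have h2 : ¬ a[(lo + hi) / 2] < x := by
          simpa [List.getD_eq_getElem?_getD, List.getElem?_eq_getElem hmid] using hcmp
        omega
    · rw [pvBisect, if_neg hlt]
      exact ⟨by omega, fun k hk h => hlow k hk h, fun k hk h => hhigh k hk (by omega)⟩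

theorem pvContains_eq_mem (a : List Int) (x : Int) (ha : a.Pairwise (· ≤ ·)) :
    pvContains a x = decide (x ∈ a) := by
  obtain ⟨h1, h2, h3⟩ := pvBisect_spec a x ha a.length 0 a.length le_rfl (Nat.zero_le _)
    (by omega) (fun k hk h => by omega) (fun k hk h => by omega)
  set lo := pvBisect a x a.length 0 a.length with hlo
  by_cases hmem : x ∈ a
  · obtain ⟨k, hk, hkx⟩ := List.mem_iff_getElem.mp hmem
    have hklo : lo ≤ k := by
      by_contra hc
      have := h2 k hk (by omega)
      omega
    have hlolen : lo < a.length := by omega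
    have hxle : x ≤ a[lo] := h3 lo hlolen le_rfl
    have hge : a[lo] ≤ a[k] := pv_pairwise_le_getElem a ha lo k hk hklo
    have hEq : a[lo] = x := by omega
    simp [pvContains, ← hlo, hlolen, hmem, List.getD_eq_getElem?_getD, hEq]
  · simp only [pvContains, ← hlo]
    rcases Nat.lt_or_ge lo a.length with hlt | hge
    · have : a[lo] ≠ x := fun hEq => hmem (hEq ▸ List.getElem_mem hlt)
      simp [hlt, hmem, List.getD_eq_getElem?_getD, this]
    · simp [hmem, Nat.not_lt.mpr hge]

-- every element of an (i+1)-prefix of a sorted list is ≤ the element at index i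
theorem pv_mem_take_le (s : List Int) (hs : s.Pairwise (· ≤ ·)) (i : Nat)
    (hi : i < s.length) (z : Int) (hz : z ∈ s.take (i + 1)) : z ≤ s[i] := by
  rw [List.mem_take_iff_getElem] at hz
  obtain ⟨m, hm, hmz⟩ := hz
  have hmle : m ≤ i := by omega
  calc z = s[m]'(by omega) := hmz.symm
    _ ≤ s[i] := pv_pairwise_le_getElem s hs m i hi hmle

-- A's two-pointer loop on sorted lists = largest-first scan of the prefix with membership test
theorem pvLoopA_eq (s1 s2 : List Int) (h1 : s1.Pairwise (· ≤ ·)) (h2 : s2.Pairwise (· ≤ ·)) :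
    ∀ (fuel : Nat) (i j : Int), (i + 1).toNat + (j + 1).toNat = fuel →
    i < (s1.length : Int) → j < (s2.length : Int) →
    pvLoopA s1 s2 fuel i j =
      ((s1.take (i + 1).toNat).reverse).find? (fun x => decide (x ∈ s2.take (j + 1).toNat)) := by
  intro fuel
  induction fuel with
  | zero =>
    intro i j hn _ _
    have e1 : (i + 1).toNat = 0 := by omega
    rw [pvLoopA, e1]
    simp
  | succ f ih =>
    intro i j hn hi hj
    by_cases hpos : 0 ≤ i ∧ 0 ≤ j
    · obtain ⟨hip, hjp⟩ := hpos
      have hiN : i.toNat < s1.length := by omega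
      have hjN : j.toNat < s2.length := by omega
      have hga : PySem.List.pyGet? s1 i = some (s1[i.toNat]) := by
        simp [PySem.List.pyGet?, PySem.List.pyIdx?, hip, hi]
      have hgb : PySem.List.pyGet? s2 j = some (s2[j.toNat]) := by
        simp [PySem.List.pyGet?, PySem.List.pyIdx?, hjp, hj]
      have hi1 : (i + 1).toNat = i.toNat + 1 := by omega
      have hj1 : (j + 1).toNat = j.toNat + 1 := by omega
      have htk1 : s1.take (i + 1).toNat = s1.take i.toNat ++ [s1[i.toNat]] := by
        rw [hi1, List.take_add_one, List.getElem?_eq_getElem hiN]; rfl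
      rw [pvLoopA, if_pos ⟨hip, hjp⟩, hga, hgb]
      dsimp only
      set a := s1[i.toNat] with haa
      set b := s2[j.toNat] with hbb
      have hrev : (s1.take (i + 1).toNat).reverse = a :: (s1.take i.toNat).reverse := by
        rw [htk1]; simp
      by_cases hab : a = b
      · have hbmem : a ∈ s2.take (j + 1).toNat := by
          rw [hj1, hab, hbb]
          exact List.mem_take_iff_getElem.mpr ⟨j.toNat, by omega, rfl⟩
        rw [if_pos hab, hrev]
        simp [List.find?, hbmem]
      · rw [if_neg hab]
        by_cases hgt : a > b
        · rw [if_pos hgt]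
          have hanot : a ∉ s2.take (j + 1).toNat := by
            intro hmem
            have := pv_mem_take_le s2 h2 j.toNat hjN a (hj1 ▸ hmem)
            omega
          have hIH := ih (i - 1) j (by omega) (by omega) hj
          rw [hIH, hrev]
          have : (i - 1 + 1).toNat = i.toNat := by omega
          rw [this]
          simp [List.find?, hanot]
        · rw [if_neg hgt]
          have hlt : a < b := by omega
          have hIH := ih i (j - 1) (by omega) hi (by omega)
          rw [hIH]
          have hjm : (j - 1 + 1).toNat = j.toNat := by omega
          rw [hjm]
          apply pv_find?_congr
          intro z hz
          have hz1 : z ∈ s1.take (i + 1).toNat := List.mem_reverse.mp hz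
          have hzle : z ≤ a := pv_mem_take_le s1 h1 i.toNat hiN z (hi1 ▸ hz1)
          have htk2 : s2.take (j + 1).toNat = s2.take j.toNat ++ [b] := by
            rw [hj1, List.take_add_one, List.getElem?_eq_getElem hjN]; rfl
          have hzb : z ≠ b := by omega
          simp [htk2, hzb]
    · rw [pvLoopA, if_neg hpos]
      rcases Classical.not_and_iff_not_or_not.mp hpos with h | h
      · have : (i + 1).toNat = 0 := by omega
        rw [this]; simp
      · have : (j + 1).toNat = 0 := by omega
        rw [this]
        symm
        apply List.find?_eq_none.mpr
        intro x hx
        simp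

-- ===== VERDICT (by name: the statement is the Claim_ definition above) =====
theorem find_largest_common_element_spec : Claim_equal_find_largest_common_element := by
  intro arr1 arr2 _
  unfold Spec_find_largest_common_element find_largest_common_element find_largest_common_element_alt
  set s1 := PySem.List.sorted arr1 (fun x => x) with hs1
  set s2 := PySem.List.sorted arr2 (fun x => x) with hs2
  have h1 : s1.Pairwise (· ≤ ·) := by
    simpa using PySem.List.sorted_pairwise arr1 (fun x => x)
  have h2 : s2.Pairwise (· ≤ ·) := by
    simpa using PySem.List.sorted_pairwise arr2 (fun x => x)
  have hA := pvLoopA_eq s1 s2 h1 h2 (s1.length + s2.length)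
    ((s1.length : Int) - 1) ((s2.length : Int) - 1) (by omega) (by omega) (by omega)
  have e1 : (((s1.length : Int) - 1) + 1).toNat = s1.length := by omega
  have e2 : (((s2.length : Int) - 1) + 1).toNat = s2.length := by omega
  rw [e1, e2] at hA
  rw [hA, List.take_length, List.take_length]
  apply pv_find?_congr
  intro x hx
  exact (pvContains_eq_mem s2 x h2).symm
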